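-- pv_equiv track=rewrite | github.com/igupansini/Programacao-Linear-FATEC | Ex_4-Matriz.py | somarTresMatrizes
-- ===== SOURCE A (Python) =====
-- def somarTresMatrizes(matriz1, matriz2, matriz3):
--     matriz_soma = []
--     quant_linhas = len(matriz1)
--     quant_colunas = len(matriz1[0])
--     for i in range(quant_linhas):
--         matriz_soma.append([])
--         for j in range(quant_colunas):
--             soma = matriz1[i][j] + matriz2[i][j] + matriz3[i][j]
--             matriz_soma[i].append(soma)
--     return matriz_soma
-- ===== SOURCE B (Python) =====
-- def somarTresMatrizes(matriz1, matriz2, matriz3):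
--     # Pairwise fold: accumulate one matrix at a time with a binary element-wise add.
--     soma = matriz1
--     for outra in (matriz2, matriz3):
--         soma = [[soma[i][j] + outra[i][j] for j in range(len(matriz1[0]))]
--                 for i in range(len(matriz1))]
--     return soma
-- ===== Notes on version B (the rewrite author's own statement) =====
-- stated objective: alternative
-- what changed: B replaces A's single triple-add nested append loop by a fold over the other two matrices: a binary element-wise add applied twice (matriz1+matriz2, then +matriz3), built with comprehensions instead of append.
-- crash fix: On matriz1 == [] A raises IndexError at len(matriz1[0]) while B returns []; A also raises IndexError on ragged/too-short matriz2/matriz3, which Pre_ excludes. — e.g. on somarTresMatrizes([], [], []): A raises IndexError, B returns []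
import Mathlib
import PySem

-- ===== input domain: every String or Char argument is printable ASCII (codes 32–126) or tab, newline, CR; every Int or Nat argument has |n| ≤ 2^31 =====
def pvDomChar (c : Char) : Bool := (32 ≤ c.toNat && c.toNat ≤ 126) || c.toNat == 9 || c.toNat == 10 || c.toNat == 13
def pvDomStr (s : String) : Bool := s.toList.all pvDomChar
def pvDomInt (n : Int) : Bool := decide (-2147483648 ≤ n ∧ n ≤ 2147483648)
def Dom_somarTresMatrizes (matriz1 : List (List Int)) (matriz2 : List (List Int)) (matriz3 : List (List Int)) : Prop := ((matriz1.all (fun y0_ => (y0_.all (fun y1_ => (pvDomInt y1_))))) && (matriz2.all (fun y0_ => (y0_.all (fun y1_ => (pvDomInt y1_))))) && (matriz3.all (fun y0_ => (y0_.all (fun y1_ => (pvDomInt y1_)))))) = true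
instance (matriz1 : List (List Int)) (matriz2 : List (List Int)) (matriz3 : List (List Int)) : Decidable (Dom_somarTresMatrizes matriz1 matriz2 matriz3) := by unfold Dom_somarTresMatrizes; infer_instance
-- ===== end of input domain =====

-- B replaces A's single triple-add nested append loop by a pairwise fold (binary element-wise
-- add applied twice) built with comprehensions — objective: alternative decomposition, same cost.

-- ===== PORT A =====
-- matriz[i][j]; out-of-range defaults are unreachable under Pre_ (Python raises there)
def pvGet2 (m : List (List Int)) (i j : Int) : Int :=
  PySem.List.pyGetD (PySem.List.pyGetD m i []) j 0

def somarTresMatrizes (matriz1 : List (List Int)) (matriz2 : List (List Int)) (matriz3 : List (List Int)) : List (List Int) :=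
  let quant_linhas : Int := matriz1.length
  let quant_colunas : Int := (matriz1.headD []).length
  (PySem.List.pyRange 0 quant_linhas 1).foldl
    (fun matriz_soma i =>
      matriz_soma ++ [(PySem.List.pyRange 0 quant_colunas 1).foldl
        (fun linha j =>
          let soma := pvGet2 matriz1 i j + pvGet2 matriz2 i j + pvGet2 matriz3 i j
          linha ++ [soma]) []])
    []

-- ===== PORT B =====
def somarTresMatrizes_alt (matriz1 : List (List Int)) (matriz2 : List (List Int)) (matriz3 : List (List Int)) : List (List Int) :=
  [matriz2, matriz3].foldl
    (fun soma outra =>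
      (PySem.List.pyRange 0 (matriz1.length : Int) 1).map (fun i =>
        (PySem.List.pyRange 0 ((matriz1.headD []).length : Int) 1).map (fun j =>
          pvGet2 soma i j + pvGet2 outra i j)))
    matriz1

-- ===== PRECONDITION & SPEC =====
-- Pre_ excludes exactly the inputs where Python A raises IndexError: empty matriz1,
-- matriz2/matriz3 with fewer rows than matriz1, or any accessed row shorter than matriz1[0].
def Pre_somarTresMatrizes (matriz1 : List (List Int)) (matriz2 : List (List Int)) (matriz3 : List (List Int)) : Prop :=
  matriz1 ≠ [] ∧
  ((matriz1.headD []).length = 0 ∨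
    (matriz1.length ≤ matriz2.length ∧ matriz1.length ≤ matriz3.length ∧
     ∀ i < matriz1.length,
       (matriz1.headD []).length ≤ (matriz1.getD i []).length ∧
       (matriz1.headD []).length ≤ (matriz2.getD i []).length ∧
       (matriz1.headD []).length ≤ (matriz3.getD i []).length))
instance (matriz1 : List (List Int)) (matriz2 : List (List Int)) (matriz3 : List (List Int)) : Decidable (Pre_somarTresMatrizes matriz1 matriz2 matriz3) := by unfold Pre_somarTresMatrizes; infer_instance

def pvWitness_somarTresMatrizes : List (List Int) × List (List Int) × List (List Int) :=
  ([[1, 2], [3, 4]], [[5, 6], [7, 8]], [[9, 10], [11, 12]])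

-- On matriz1 == [] Python A raises IndexError at len(matriz1[0]) while B returns [].
def Raises_somarTresMatrizes (matriz1 : List (List Int)) (_matriz2 : List (List Int)) (_matriz3 : List (List Int)) : Prop := matriz1 = []
instance (matriz1 : List (List Int)) (matriz2 : List (List Int)) (matriz3 : List (List Int)) : Decidable (Raises_somarTresMatrizes matriz1 matriz2 matriz3) := by unfold Raises_somarTresMatrizes; infer_instance
def pvRaiseWitness_somarTresMatrizes : List (List Int) × List (List Int) × List (List Int) := ([], [], [])
def pvRaiseWitnessOut_somarTresMatrizes : List (List Int) := []

def Spec_somarTresMatrizes (matriz1 : List (List Int)) (matriz2 : List (List Int)) (matriz3 : List (List Int)) (out : List (List Int)) : Prop := out = somarTresMatrizes_alt matriz1 matriz2 matriz3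
instance (matriz1 : List (List Int)) (matriz2 : List (List Int)) (matriz3 : List (List Int)) (out : List (List Int)) : Decidable (Spec_somarTresMatrizes matriz1 matriz2 matriz3 out) := by unfold Spec_somarTresMatrizes; infer_instance

-- ===== CLAIM (what is proved, stated in full; the proofs are below) =====
def Claim_equal_somarTresMatrizes : Prop := ∀ (matriz1 : List (List Int)) (matriz2 : List (List Int)) (matriz3 : List (List Int)), Dom_somarTresMatrizes matriz1 matriz2 matriz3 → Pre_somarTresMatrizes matriz1 matriz2 matriz3 → Spec_somarTresMatrizes matriz1 matriz2 matriz3 (somarTresMatrizes matriz1 matriz2 matriz3)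
def Claim_raises_somarTresMatrizes : Prop := (∀ (matriz1 : List (List Int)) (matriz2 : List (List Int)) (matriz3 : List (List Int)), Dom_somarTresMatrizes matriz1 matriz2 matriz3 → Raises_somarTresMatrizes matriz1 matriz2 matriz3 → ¬ Pre_somarTresMatrizes matriz1 matriz2 matriz3) ∧ (Dom_somarTresMatrizes (pvRaiseWitness_somarTresMatrizes.1) (pvRaiseWitness_somarTresMatrizes.2.1) (pvRaiseWitness_somarTresMatrizes.2.2) ∧ Raises_somarTresMatrizes (pvRaiseWitness_somarTresMatrizes.1) (pvRaiseWitness_somarTresMatrizes.2.1) (pvRaiseWitness_somarTresMatrizes.2.2) ∧ somarTresMatrizes_alt (pvRaiseWitness_somarTresMatrizes.1) (pvRaiseWitness_somarTresMatrizes.2.1) (pvRaiseWitness_somarTresMatrizes.2.2) = pvRaiseWitnessOut_somarTresMatrizes)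

-- ===== LEMMAS AND PROOFS =====

-- A in map form (both foldl-append loops are List.map)
theorem somarTresMatrizes_eq_map (m1 m2 m3 : List (List Int)) :
    somarTresMatrizes m1 m2 m3 =
      (PySem.List.pyRange 0 (m1.length : Int) 1).map (fun i =>
        (PySem.List.pyRange 0 ((m1.headD []).length : Int) 1).map (fun j =>
          pvGet2 m1 i j + pvGet2 m2 i j + pvGet2 m3 i j)) := by
  simp only [somarTresMatrizes, PySem.List.foldl_append_singleton_eq_map, List.nil_append]

-- indexing into one pass of B's fold
theorem pvGet2_step (f : Int → Int → Int) (r c i j : Int)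
    (hi0 : 0 ≤ i) (hir : i < r) (hj0 : 0 ≤ j) (hjc : j < c) :
    pvGet2 ((PySem.List.pyRange 0 r 1).map (fun i =>
      (PySem.List.pyRange 0 c 1).map (fun j => f i j))) i j = f i j := by
  unfold pvGet2
  rw [PySem.List.pyGetD_map_pyRange_of_nonneg _ r i [] hi0 hir,
      PySem.List.pyGetD_map_pyRange_of_nonneg _ c j 0 hj0 hjc]

-- ===== VERDICT (by name: the statement is the Claim_ definition above) =====
theorem somarTresMatrizes_spec : Claim_equal_somarTresMatrizes := by
  intro m1 m2 m3 _ _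
  show somarTresMatrizes m1 m2 m3 = somarTresMatrizes_alt m1 m2 m3
  rw [somarTresMatrizes_eq_map]
  unfold somarTresMatrizes_alt
  simp only [List.foldl_cons, List.foldl_nil]
  apply List.map_congr_left
  intro i hi
  apply List.map_congr_left
  intro j hj
  rw [PySem.List.mem_pyRange_one] at hi hj
  rw [pvGet2_step (fun i j => pvGet2 m1 i j + pvGet2 m2 i j) _ _ i j hi.1 hi.2 hj.1 hj.2]

def somarTresMatrizes_raises : Claim_raises_somarTresMatrizes := by
  unfold Claim_raises_somarTresMatrizes
  refine ⟨?_, by decide⟩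
  intro m1 m2 m3 _ hr hp
  exact hp.1 hr
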